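-- pv_equiv track=rewrite | github.com/ctrlaltwilso/python-challenges | array-interactions/array-interactions.py | solution
-- ===== SOURCE A (Python) =====
-- def solution(s):
--     remaining_char = list(s)
--     removed = []
--
--     while len(remaining_char) > 0:
--         if len(remaining_char) == 1:
--             removed.append(remaining_char[0])
--             break
--
--         next_round = []
--         i = 0
--
--         while i < len(remaining_char) - 1:
--             a, b = remaining_char[i], remaining_char[i+1]
--             if a <= b:
--                 removed.append(a)
--                 next_round.append(b)
--             else:
--                 removed.append(b)
--                 next_round.append(a)
--             i += 2
--         if i < len(remaining_char):
--             next_round.append(remaining_char[-1])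
--         remaining_char = next_round
--
--     return removed
-- ===== SOURCE B (Python) =====
-- def solution(s):
--     def one_round(rem):
--         removed, kept = [], []
--         for a, b in zip(rem[0::2], rem[1::2]):
--             removed.append(min(a, b))
--             kept.append(max(a, b))
--         if len(rem) % 2 == 1:
--             kept.append(rem[-1])
--         return removed, kept
--
--     def solve(rem):
--         if not rem:
--             return []
--         if len(rem) == 1:
--             return [rem[0]]
--         removed, kept = one_round(rem)
--         return removed + solve(kept)
--
--     return solve(list(s))
-- ===== Notes on version B (the rewrite author's own statement) =====
-- stated objective: simpler
-- what changed: A's imperative outer while over rounds with an index-stepping inner while is replaced by a recursive decomposition: a one_round helper zips the stride-2 slices rem[0::2]/rem[1::2], collecting min of each pair as removed and max as kept (plus an odd leftover), and solve recurses on the kept winners list.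
import Mathlib
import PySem

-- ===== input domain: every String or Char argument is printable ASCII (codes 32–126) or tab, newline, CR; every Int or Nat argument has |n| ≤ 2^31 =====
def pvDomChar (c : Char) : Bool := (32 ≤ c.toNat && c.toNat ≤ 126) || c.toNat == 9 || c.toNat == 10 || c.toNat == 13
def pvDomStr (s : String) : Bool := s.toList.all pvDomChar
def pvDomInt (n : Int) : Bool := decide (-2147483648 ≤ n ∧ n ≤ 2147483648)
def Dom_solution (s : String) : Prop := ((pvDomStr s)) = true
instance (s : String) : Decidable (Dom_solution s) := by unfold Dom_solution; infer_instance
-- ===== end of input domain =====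

-- B replaces A's index-stepping outer while loop by a recursive round decomposition
-- (one zip-of-strides round, then recurse on the kept list); objective: simpler.

-- ===== PORT A =====
-- inner 'while i < len - 1' loop of A, stepping i by 2; the trailing single
-- element (A's 'if i < len') becomes the [x] case.
def pvRoundA : List Char → List String × List Char
  | [] => ([], [])
  | [x] => ([], [x])
  | a :: b :: rest =>
    if a ≤ b then (String.ofList [a] :: (pvRoundA rest).1, b :: (pvRoundA rest).2)
    else (String.ofList [b] :: (pvRoundA rest).1, a :: (pvRoundA rest).2)

theorem pvRoundA_snd_len : ∀ l : List Char, ((pvRoundA l).2).length = (l.length + 1) / 2 := by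
  intro l
  induction l using pvRoundA.induct with
  | case1 => simp [pvRoundA]
  | case2 x => simp [pvRoundA]
  | case3 a b rest h ih => simp [pvRoundA, h, ih]; omega
  | case4 a b rest h ih => simp [pvRoundA, h, ih]; omega

-- outer 'while len(remaining_char) > 0' loop of A, with the accumulated 'removed'
def pvLoopA (rem : List Char) (removed : List String) : List String :=
  match rem with
  | [] => removed
  | [c] => removed ++ [String.ofList [c]]
  | a :: b :: rest =>
    pvLoopA (pvRoundA (a :: b :: rest)).2 (removed ++ (pvRoundA (a :: b :: rest)).1)
  termination_by rem.length
  decreasing_by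
    have h := pvRoundA_snd_len (a :: b :: rest)
    simp at h ⊢; omega

def solution (s : String) : List String := pvLoopA s.toList []

-- ===== PORT B =====
-- rem[0::2] and rem[1::2]  (stride-2 slices used by Source B's zip)
def pvEvens : List Char → List Char
  | [] => []
  | [x] => [x]
  | a :: _ :: rest => a :: pvEvens rest

def pvOdds : List Char → List Char
  | [] => []
  | [_] => []
  | _ :: b :: rest => b :: pvOdds rest

-- Source B's one_round: min of each zipped pair is removed, max is kept, odd leftover kept
def pvOneRound (rem : List Char) : List String × List Char :=
  let ps := (pvEvens rem).zip (pvOdds rem)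
  let removed := ps.map (fun p => String.ofList [min p.1 p.2])
  let kept := ps.map (fun p => max p.1 p.2)
  let kept := if rem.length % 2 = 1 then kept ++ rem.getLast?.toList else kept
  (removed, kept)

theorem pvEvens_len : ∀ l : List Char, (pvEvens l).length = (l.length + 1) / 2 := by
  intro l
  induction l using pvEvens.induct with
  | case1 => simp [pvEvens]
  | case2 x => simp [pvEvens]
  | case3 a b rest ih => simp [pvEvens, ih]; omega

theorem pvOdds_len : ∀ l : List Char, (pvOdds l).length = l.length / 2 := by
  intro l
  induction l using pvOdds.induct with
  | case1 => simp [pvOdds]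
  | case2 x => simp [pvOdds]
  | case3 a b rest ih => simp [pvOdds, ih]; omega

theorem pvOneRound_snd_len : ∀ l : List Char, ((pvOneRound l).2).length = (l.length + 1) / 2 := by
  intro l
  match l with
  | [] => simp [pvOneRound, pvEvens, pvOdds]
  | c :: t =>
    have hg : ((c :: t).getLast?).isSome := by simp
    obtain ⟨x, hx⟩ := Option.isSome_iff_exists.mp hg
    have h1 := pvEvens_len (c :: t)
    have h2 := pvOdds_len (c :: t)
    simp only [pvOneRound, hx]
    split <;> rename_i hc <;>
      simp only [List.length_append, List.length_map, List.length_zip, Option.toList_some,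
        List.length_cons, List.length_nil, h1, h2] at hc ⊢ <;> omega

-- Source B's solve: recursion on the kept winners of one round
def pvSolve (rem : List Char) : List String :=
  match rem with
  | [] => []
  | [c] => [String.ofList [c]]
  | a :: b :: rest =>
    (pvOneRound (a :: b :: rest)).1 ++ pvSolve (pvOneRound (a :: b :: rest)).2
  termination_by rem.length
  decreasing_by
    have h := pvOneRound_snd_len (a :: b :: rest)
    simp at h ⊢; omega

def solution_alt (s : String) : List String := pvSolve s.toList

-- ===== PRECONDITION & SPEC =====
def Spec_solution (s : String) (out : List String) : Prop := out = solution_alt s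
instance (s : String) (out : List String) : Decidable (Spec_solution s out) := by unfold Spec_solution; infer_instance

-- ===== CLAIM (what is proved, stated in full; the proofs are below) =====
def Claim_equal_solution : Prop := ∀ (s : String), Dom_solution s → Spec_solution s (solution s)

-- ===== LEMMAS AND PROOFS =====

theorem pvOneRound_nil : pvOneRound [] = ([], []) := by simp [pvOneRound, pvEvens, pvOdds]

theorem pvOneRound_single (x : Char) : pvOneRound [x] = ([], [x]) := by
  simp [pvOneRound, pvEvens, pvOdds]

theorem pvOneRound_cons (a b : Char) (rest : List Char) :
    pvOneRound (a :: b :: rest) =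
      (String.ofList [min a b] :: (pvOneRound rest).1, max a b :: (pvOneRound rest).2) := by
  simp only [pvOneRound, pvEvens, pvOdds, List.zip_cons_cons, List.map_cons, List.length_cons]
  have hmod : (rest.length + 1 + 1) % 2 = rest.length % 2 := by omega
  rw [hmod]
  split
  · rename_i hodd
    have hne : rest ≠ [] := by
      intro h; subst h; simp at hodd
    match rest, hne with
    | c :: t, _ => simp
  · rfl

theorem pvRoundA_eq_oneRound : ∀ l : List Char, pvRoundA l = pvOneRound l := by
  intro l
  induction l using pvRoundA.induct with
  | case1 => simp [pvRoundA, pvOneRound_nil]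
  | case2 x => simp [pvRoundA, pvOneRound_single]
  | case3 a b rest h ih =>
    rw [pvOneRound_cons]
    simp [pvRoundA, h, ih]
  | case4 a b rest h ih =>
    rw [pvOneRound_cons]
    have hba : b ≤ a := (not_le.mp h).le
    simp [pvRoundA, h, ih, min_eq_right hba, max_eq_left hba]

theorem pvLoopA_eq_solve : ∀ (n : ℕ) (l : List Char) (removed : List String),
    l.length ≤ n → pvLoopA l removed = removed ++ pvSolve l := by
  intro n
  induction n with
  | zero =>
    intro l removed h
    have : l = [] := by cases l <;> simp_all
    subst this; simp [pvLoopA, pvSolve]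
  | succ n ih =>
    intro l removed h
    match l with
    | [] => simp [pvLoopA, pvSolve]
    | [c] => simp [pvLoopA, pvSolve]
    | a :: b :: rest =>
      rw [pvLoopA, pvSolve, pvRoundA_eq_oneRound]
      rw [ih ((pvOneRound (a :: b :: rest)).2) _ ?_]
      · simp
      · have := pvOneRound_snd_len (a :: b :: rest)
        simp at this ⊢
        simp at h
        omega

-- ===== VERDICT (by name: the statement is the Claim_ definition above) =====
theorem solution_spec : Claim_equal_solution := by
  intro s _
  unfold Spec_solution solution solution_alt
  exact (pvLoopA_eq_solve s.toList.length s.toList [] le_rfl).trans (by simp)
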